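-- pv_equiv track=rewrite | github.com/itsjustsandzz/dee_tee_train | MP-SPDZ/Compiler/dt_unit_tests_util.py | ComputeGiniSingleGroup_plain
-- ===== SOURCE A (Python) =====
-- def ComputeGiniSingleGroup_plain (x_plain, y_plain):
--     n = len(x_plain)
--
--     tot_y0 = 0
--     tot_y1 = 0
--
--     for y_ele in y_plain:
--         if y_ele == 0:
--             tot_y0 = tot_y0 + 1
--         elif y_ele == 1:
--             tot_y1 = tot_y1 + 1
--
--     y0 = 0
--     y1 = 0
--     numerator = [None]*n
--     denominator = [None]*n
--     threshold = [None]*n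
--     MIN_VALUE = -10000
--     for i in range(n - 1):
--         if y_plain[i] == 0:
--             y0 = y0 + 1
--         else:
--             y1 = y1 + 1
--         if x_plain[i] == x_plain[i+1]:
--             numerator[i]= MIN_VALUE
--             denominator[i]= 1
--             threshold[i]= MIN_VALUE
--         else:
--             numerator[i] = (n-i-1)*(y0**2 + y1**2) + (i+1)*( (tot_y0 - y0)**2 + (tot_y1 - y1)**2 )
--             denominator[i] = (n-i-1)*(i+1)
--             threshold[i]= x_plain[i] + x_plain[i+1]
--     numerator[n-1]= MIN_VALUE
--     denominator[n-1] = 1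
--     threshold[n-1] = MIN_VALUE
--     return numerator, denominator, threshold
-- ===== SOURCE B (Python) =====
-- def ComputeGiniSingleGroup_plain(x_plain, y_plain):
--     n = len(x_plain)
--     MIN_VALUE = -10000
--     tot_y0 = y_plain.count(0)
--     tot_y1 = y_plain.count(1)
--     # prefix counts: pre0[i] = #(y==0) among y_plain[0..i], pre1[i] = (i+1) - pre0[i]
--     pre0 = []
--     pre1 = []
--     for i in range(n - 1):
--         c0 = (pre0[-1] if pre0 else 0) + (1 if y_plain[i] == 0 else 0)
--         pre0.append(c0)
--         pre1.append(i + 1 - c0)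
--     numerator = []
--     denominator = []
--     threshold = []
--     for i in range(n - 1):
--         if x_plain[i] == x_plain[i + 1]:
--             numerator.append(MIN_VALUE)
--             denominator.append(1)
--             threshold.append(MIN_VALUE)
--         else:
--             y0, y1 = pre0[i], pre1[i]
--             numerator.append((n - i - 1) * (y0 ** 2 + y1 ** 2)
--                              + (i + 1) * ((tot_y0 - y0) ** 2 + (tot_y1 - y1) ** 2))
--             denominator.append((n - i - 1) * (i + 1))
--             threshold.append(x_plain[i] + x_plain[i + 1])
--     numerator.append(MIN_VALUE)
--     denominator.append(1)
--     threshold.append(MIN_VALUE)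
--     return numerator, denominator, threshold
-- ===== Notes on version B (the rewrite author's own statement) =====
-- stated objective: alternative
-- what changed: A fills three preallocated arrays by destructive index assignment while threading running class counters through the single main loop; B first computes the totals with list.count and materialises explicit prefix-count arrays pre0/pre1 in a separate pass, then builds the three output lists by appending, reading the left/right class counts out of the prefix arrays.
import Mathlib
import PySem

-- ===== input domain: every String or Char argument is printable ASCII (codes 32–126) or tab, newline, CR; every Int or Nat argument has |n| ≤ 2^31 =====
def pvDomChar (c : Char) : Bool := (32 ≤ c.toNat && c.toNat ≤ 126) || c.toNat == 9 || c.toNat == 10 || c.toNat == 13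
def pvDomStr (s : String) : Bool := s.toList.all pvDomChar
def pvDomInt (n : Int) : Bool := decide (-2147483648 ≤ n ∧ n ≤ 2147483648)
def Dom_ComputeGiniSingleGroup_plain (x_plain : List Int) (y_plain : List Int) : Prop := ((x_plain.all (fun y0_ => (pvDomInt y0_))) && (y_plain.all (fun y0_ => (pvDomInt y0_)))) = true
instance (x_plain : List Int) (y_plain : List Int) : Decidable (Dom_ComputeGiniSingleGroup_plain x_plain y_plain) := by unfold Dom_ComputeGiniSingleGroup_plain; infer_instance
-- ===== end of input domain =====

-- B replaces A's destructive index assignment with precomputed prefix-count arrays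
-- and append-built output lists (objective: alternative decomposition, same cost).

-- ===== PORT A =====
-- Literal port of A. Indexing y_plain[i] / x_plain[i] / x_plain[i+1] is via List.getD:
-- exact under Pre_ (every such index is in range there). [None]*n is modelled as
-- replicate n 0 (every cell is overwritten under Pre_). The final assignments
-- numerator[n-1] = … are List.set (n-1); Python raises IndexError there when n = 0
-- (index -1 of an empty list), which Pre_ excludes. Loop bodies are named helpers
-- so the loop lemmas below can cite them.

-- body of A's totals loop (the if/elif over y_ele)
def pvTotStepA (t : Int × Int) (y_ele : Int) : Int × Int :=
  if y_ele = 0 then (t.1 + 1, t.2) else if y_ele = 1 then (t.1, t.2 + 1) else t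

-- body of A's main loop: update the running split counters, then assign the three cells
def pvMainStepA (x_plain y_plain : List Int) (tot : Int × Int)
    (st : Int × Int × List Int × List Int × List Int) (i : Nat) :
    Int × Int × List Int × List Int × List Int :=
  let y0 := if y_plain.getD i 0 = 0 then st.1 + 1 else st.1
  let y1 := if y_plain.getD i 0 = 0 then st.2.1 else st.2.1 + 1
  let num := st.2.2.1
  let den := st.2.2.2.1
  let thr := st.2.2.2.2
  if x_plain.getD i 0 = x_plain.getD (i+1) 0 then
    (y0, y1, num.set i (-10000), den.set i 1, thr.set i (-10000))
  else
    (y0, y1,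
     num.set i (((x_plain.length : Int) - i - 1) * (y0 ^ 2 + y1 ^ 2)
                 + ((i : Int) + 1) * ((tot.1 - y0) ^ 2 + (tot.2 - y1) ^ 2)),
     den.set i (((x_plain.length : Int) - i - 1) * ((i : Int) + 1)),
     thr.set i (x_plain.getD i 0 + x_plain.getD (i+1) 0))

def ComputeGiniSingleGroup_plain (x_plain : List Int) (y_plain : List Int) : List Int × List Int × List Int :=
  let n := x_plain.length
  let tot := y_plain.foldl pvTotStepA (0, 0)
  let st := (List.range (n - 1)).foldl (pvMainStepA x_plain y_plain tot)
      (0, 0, List.replicate n (0 : Int), List.replicate n (0 : Int), List.replicate n (0 : Int))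
  (st.2.2.1.set (n - 1) (-10000), st.2.2.2.1.set (n - 1) 1, st.2.2.2.2.set (n - 1) (-10000))

-- ===== PORT B =====
-- Literal port of Source B: totals by list.count, prefix arrays pre0/pre1 built by
-- appending (`pre0[-1] if pre0 else 0` → getLast?.getD 0), then the output lists
-- built by appending while indexing the prefix arrays (getD: in range under Pre_).

-- body of Source B's prefix-building loop
def pvPreStepB (y_plain : List Int) (p : List Int × List Int) (i : Nat) : List Int × List Int :=
  let c0 := (p.1.getLast?.getD 0) + (if y_plain.getD i 0 = 0 then 1 else 0)
  (p.1 ++ [c0], p.2 ++ [(i : Int) + 1 - c0])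

-- body of Source B's output-building loop
def pvOutStepB (x_plain : List Int) (tot_y0 tot_y1 : Int) (pre0 pre1 : List Int)
    (o : List Int × List Int × List Int) (i : Nat) : List Int × List Int × List Int :=
  if x_plain.getD i 0 = x_plain.getD (i+1) 0 then
    (o.1 ++ [(-10000 : Int)], o.2.1 ++ [1], o.2.2 ++ [(-10000 : Int)])
  else
    let y0 := pre0.getD i 0
    let y1 := pre1.getD i 0
    (o.1 ++ [((x_plain.length : Int) - i - 1) * (y0 ^ 2 + y1 ^ 2)
              + ((i : Int) + 1) * ((tot_y0 - y0) ^ 2 + (tot_y1 - y1) ^ 2)],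
     o.2.1 ++ [((x_plain.length : Int) - i - 1) * ((i : Int) + 1)],
     o.2.2 ++ [x_plain.getD i 0 + x_plain.getD (i+1) 0])

def ComputeGiniSingleGroup_plain_alt (x_plain : List Int) (y_plain : List Int) : List Int × List Int × List Int :=
  let n := x_plain.length
  let tot_y0 : Int := PySem.List.count y_plain 0
  let tot_y1 : Int := PySem.List.count y_plain 1
  let pre := (List.range (n - 1)).foldl (pvPreStepB y_plain) ([], [])
  let out := (List.range (n - 1)).foldl (pvOutStepB x_plain tot_y0 tot_y1 pre.1 pre.2) ([], [], [])
  (out.1 ++ [(-10000 : Int)], out.2.1 ++ [1], out.2.2 ++ [(-10000 : Int)])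

-- ===== PRECONDITION & SPEC =====
-- Pre_ excludes exactly the inputs where A raises IndexError: n = 0 (the final
-- numerator[n-1] assignment hits index -1 of an empty list) and y_plain shorter
-- than n-1 (the main loop reads y_plain[i] for i < n-1).
def Pre_ComputeGiniSingleGroup_plain (x_plain : List Int) (y_plain : List Int) : Prop :=
  x_plain ≠ [] ∧ x_plain.length ≤ y_plain.length + 1
instance (x_plain : List Int) (y_plain : List Int) : Decidable (Pre_ComputeGiniSingleGroup_plain x_plain y_plain) := by unfold Pre_ComputeGiniSingleGroup_plain; infer_instance

def pvWitness_ComputeGiniSingleGroup_plain : List Int × List Int := ([1, 1, 2], [0, 1, 0])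

def Spec_ComputeGiniSingleGroup_plain (x_plain : List Int) (y_plain : List Int) (out : List Int × List Int × List Int) : Prop := out = ComputeGiniSingleGroup_plain_alt x_plain y_plain
instance (x_plain : List Int) (y_plain : List Int) (out : List Int × List Int × List Int) : Decidable (Spec_ComputeGiniSingleGroup_plain x_plain y_plain out) := by unfold Spec_ComputeGiniSingleGroup_plain; infer_instance

-- ===== CLAIM (what is proved, stated in full; the proofs are below) =====
def Claim_equal_ComputeGiniSingleGroup_plain : Prop := ∀ (x_plain : List Int) (y_plain : List Int), Dom_ComputeGiniSingleGroup_plain x_plain y_plain → Pre_ComputeGiniSingleGroup_plain x_plain y_plain → Spec_ComputeGiniSingleGroup_plain x_plain y_plain (ComputeGiniSingleGroup_plain x_plain y_plain)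

-- ===== LEMMAS AND PROOFS =====

-- zeros among the first m labels, as an Int
def pvZ (y : List Int) (m : Nat) : Int := (((y.take m).countP (fun v => v == 0)) : Nat)

-- ones among all labels, as an Int
def pvO (y : List Int) : Int := ((y.countP (fun v => v == 1)) : Nat)

-- the triple written at position i (both programs write exactly this under Pre_)
def pvVal (x y : List Int) (i : Nat) : Int × Int × Int :=
  if x.getD i 0 = x.getD (i+1) 0 then (-10000, 1, -10000)
  else
    (((x.length : Int) - i - 1) * ((pvZ y (i+1)) ^ 2 + (((i : Int) + 1) - pvZ y (i+1)) ^ 2)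
      + ((i : Int) + 1) * ((pvZ y y.length - pvZ y (i+1)) ^ 2 + (pvO y - (((i : Int) + 1) - pvZ y (i+1))) ^ 2),
     ((x.length : Int) - i - 1) * ((i : Int) + 1),
     x.getD i 0 + x.getD (i+1) 0)

theorem pvZ_succ (y : List Int) (m : Nat) (hm : m < y.length) :
    pvZ y (m+1) = pvZ y m + (if y.getD m 0 = 0 then 1 else 0) := by
  unfold pvZ
  rw [List.take_succ, List.getElem?_eq_getElem hm, List.countP_append]
  rw [List.getD_eq_getElem?_getD, List.getElem?_eq_getElem hm]
  by_cases h : y[m] = 0 <;> simp [h]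

-- A's totals loop counts zeros and ones
theorem totals_foldl (y : List Int) (a b : Int) :
    y.foldl pvTotStepA (a, b) = (a + pvZ y y.length, b + pvO y) := by
  induction y generalizing a b with
  | nil => simp [pvZ, pvO]
  | cons h t ih =>
      simp only [List.foldl_cons, pvTotStepA]
      by_cases h0 : h = 0
      · rw [if_pos h0, ih]
        have hz : pvZ (h :: t) (h :: t).length = pvZ t t.length + 1 := by
          simp [pvZ, h0, List.countP_cons]
        have ho : pvO (h :: t) = pvO t := by simp [pvO, List.countP_cons, h0]
        rw [hz, ho]; simp only [Prod.mk.injEq]; constructor <;> first | trivial | omega | ring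
      · rw [if_neg h0]
        have hz : pvZ (h :: t) (h :: t).length = pvZ t t.length := by
          simp [pvZ, h0, List.countP_cons]
        by_cases h1 : h = 1
        · rw [if_pos h1, ih]
          have ho : pvO (h :: t) = pvO t + 1 := by simp [pvO, List.countP_cons, h1]
          rw [hz, ho]; simp only [Prod.mk.injEq]; constructor <;> first | trivial | omega | ring
        · rw [if_neg h1, ih]
          have ho : pvO (h :: t) = pvO t := by simp [pvO, List.countP_cons, h1]
          rw [hz, ho]

-- setting the first cell of the padding
theorem set_pad (l : List Int) (k : Nat) (v : Int) (hk : 0 < k) :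
    (l ++ List.replicate k (0:Int)).set l.length v = (l ++ [v]) ++ List.replicate (k-1) 0 := by
  rw [List.set_append_right _ _ (le_refl _)]
  cases k with
  | zero => omega
  | succ k' => simp [List.replicate_succ]

-- invariant for A's main loop
theorem A_loop (x y : List Int) (t0 t1 : Int)
    (ht0 : t0 = pvZ y y.length) (ht1 : t1 = pvO y)
    (m : Nat) (hm : m ≤ x.length - 1) (hx1 : 1 ≤ x.length) (hy : m ≤ y.length) :
    (List.range m).foldl (pvMainStepA x y (t0, t1))
      (0, 0, List.replicate x.length (0 : Int), List.replicate x.length (0 : Int), List.replicate x.length (0 : Int))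
    = (pvZ y m, (m : Int) - pvZ y m,
       (List.range m).map (fun i => (pvVal x y i).1) ++ List.replicate (x.length - m) 0,
       (List.range m).map (fun i => (pvVal x y i).2.1) ++ List.replicate (x.length - m) 0,
       (List.range m).map (fun i => (pvVal x y i).2.2) ++ List.replicate (x.length - m) 0) := by
  induction m with
  | zero => simp [pvZ]
  | succ k ih =>
      have hz := pvZ_succ y k (by omega)
      rw [List.range_succ, List.foldl_append, ih (by omega) (by omega)]
      simp only [List.foldl_cons, List.foldl_nil, List.map_append, List.map_cons, List.map_nil,
                 pvMainStepA]
      have hpad : 0 < x.length - k := by omega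
      have hstep : ∀ f : Nat → Int, ∀ v : Int,
          (((List.range k).map f) ++ List.replicate (x.length - k) (0:Int)).set k v
          = ((List.range k).map f ++ [v]) ++ List.replicate (x.length - (k+1)) 0 := by
        intro f v
        have h2 := set_pad ((List.range k).map f) (x.length - k) v hpad
        simp only [List.length_map, List.length_range] at h2
        rw [h2, Nat.sub_sub]
      have harith1 : (if y.getD k 0 = 0 then pvZ y k + 1 else pvZ y k) = pvZ y (k+1) := by
        rw [hz]; split_ifs <;> ring
      have harith2 : (if y.getD k 0 = 0 then (k:Int) - pvZ y k else (k:Int) - pvZ y k + 1)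
          = (k : Int) + 1 - pvZ y (k+1) := by
        rw [hz]; split_ifs <;> ring
      rw [harith1, harith2]
      by_cases hx : x.getD k 0 = x.getD (k+1) 0
      · rw [if_pos hx]
        have hv1 : (pvVal x y k).1 = -10000 := by unfold pvVal; rw [if_pos hx]
        have hv2 : (pvVal x y k).2.1 = 1 := by unfold pvVal; rw [if_pos hx]
        have hv3 : (pvVal x y k).2.2 = -10000 := by unfold pvVal; rw [if_pos hx]
        rw [hstep, hstep, hstep, hv1, hv2, hv3]
        simp only [Prod.mk.injEq]
        and_intros <;> first | rfl | trivial | (push_cast; ring)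
      · rw [if_neg hx]
        have hv1 : (pvVal x y k).1
            = ((x.length : Int) - k - 1) * ((pvZ y (k+1)) ^ 2 + (((k : Int) + 1) - pvZ y (k+1)) ^ 2)
              + ((k : Int) + 1) * ((pvZ y y.length - pvZ y (k+1)) ^ 2 + (pvO y - (((k : Int) + 1) - pvZ y (k+1))) ^ 2) := by
          unfold pvVal; rw [if_neg hx]
        have hv2 : (pvVal x y k).2.1 = ((x.length : Int) - k - 1) * ((k : Int) + 1) := by
          unfold pvVal; rw [if_neg hx]
        have hv3 : (pvVal x y k).2.2 = x.getD k 0 + x.getD (k+1) 0 := by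
          unfold pvVal; rw [if_neg hx]
        rw [hstep, hstep, hstep, hv1, hv2, hv3, ht0, ht1]
        simp only [Prod.mk.injEq]
        and_intros <;>
          first
            | rfl
            | trivial
            | (push_cast; ring)
            | (simp only [List.append_cancel_left_eq, List.append_cancel_right_eq,
                          List.cons.injEq, and_true]; push_cast; ring)

-- invariant for B's prefix-building loop
theorem B_pre_loop (y : List Int) (m : Nat) (hy : m ≤ y.length) :
    (List.range m).foldl (pvPreStepB y) ([], [])
    = ((List.range m).map (fun i => pvZ y (i+1)),
       (List.range m).map (fun (i : Nat) => ((i : Int) + 1 - pvZ y (i+1)))) := by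
  induction m with
  | zero => simp
  | succ k ih =>
      rw [List.range_succ, List.foldl_append, ih (by omega)]
      simp only [List.foldl_cons, List.foldl_nil, List.map_append, List.map_cons, List.map_nil,
                 pvPreStepB]
      have hlast : ((List.range k).map (fun i => pvZ y (i+1))).getLast?.getD 0 = pvZ y k := by
        cases k with
        | zero => simp [pvZ]
        | succ k' =>
            rw [List.range_succ, List.map_append]
            simp
      have hz := pvZ_succ y k (by omega)
      rw [hlast, hz]

-- invariant for B's output-building loop
theorem B_out_loop (x y : List Int) (t0 t1 : Int) (p0 p1 : List Int) (m : Nat)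
    (ht0 : t0 = pvZ y y.length) (ht1 : t1 = pvO y)
    (hp0 : ∀ i < m, p0.getD i 0 = pvZ y (i+1))
    (hp1 : ∀ i < m, p1.getD i 0 = (i : Int) + 1 - pvZ y (i+1)) :
    (List.range m).foldl (pvOutStepB x t0 t1 p0 p1) ([], [], [])
    = ((List.range m).map (fun i => (pvVal x y i).1),
       (List.range m).map (fun i => (pvVal x y i).2.1),
       (List.range m).map (fun i => (pvVal x y i).2.2)) := by
  induction m with
  | zero => simp
  | succ k ih =>
      rw [List.range_succ, List.foldl_append,
          ih (fun i hi => hp0 i (by omega)) (fun i hi => hp1 i (by omega))]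
      simp only [List.foldl_cons, List.foldl_nil, List.map_append, List.map_cons, List.map_nil,
                 pvOutStepB]
      by_cases hx : x.getD k 0 = x.getD (k+1) 0
      · rw [if_pos hx]
        have hv1 : (pvVal x y k).1 = -10000 := by unfold pvVal; rw [if_pos hx]
        have hv2 : (pvVal x y k).2.1 = 1 := by unfold pvVal; rw [if_pos hx]
        have hv3 : (pvVal x y k).2.2 = -10000 := by unfold pvVal; rw [if_pos hx]
        rw [hv1, hv2, hv3]
      · rw [if_neg hx]
        have hv1 : (pvVal x y k).1
            = ((x.length : Int) - k - 1) * ((pvZ y (k+1)) ^ 2 + (((k : Int) + 1) - pvZ y (k+1)) ^ 2)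
              + ((k : Int) + 1) * ((pvZ y y.length - pvZ y (k+1)) ^ 2 + (pvO y - (((k : Int) + 1) - pvZ y (k+1))) ^ 2) := by
          unfold pvVal; rw [if_neg hx]
        have hv2 : (pvVal x y k).2.1 = ((x.length : Int) - k - 1) * ((k : Int) + 1) := by
          unfold pvVal; rw [if_neg hx]
        have hv3 : (pvVal x y k).2.2 = x.getD k 0 + x.getD (k+1) 0 := by
          unfold pvVal; rw [if_neg hx]
        rw [hv1, hv2, hv3, hp0 k (by omega), hp1 k (by omega), ht0, ht1]

-- ===== VERDICT (by name: the statement is the Claim_ definition above) =====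
theorem ComputeGiniSingleGroup_plain_spec : Claim_equal_ComputeGiniSingleGroup_plain := by
  intro x y _hdom hpre
  obtain ⟨hne, hlen⟩ := hpre
  have hn : 1 ≤ x.length := List.length_pos_of_ne_nil hne
  have hcnt0 : (PySem.List.count y 0 : Int) = pvZ y y.length := by
    rw [PySem.List.count_eq, List.count_eq_countP]
    simp only [pvZ, List.take_length]
  have hcnt1 : (PySem.List.count y 1 : Int) = pvO y := by
    rw [PySem.List.count_eq, List.count_eq_countP]
    simp only [pvO]
  unfold Spec_ComputeGiniSingleGroup_plain ComputeGiniSingleGroup_plain ComputeGiniSingleGroup_plain_alt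
  simp only []
  rw [totals_foldl, zero_add, zero_add]
  rw [A_loop x y _ _ rfl rfl (x.length - 1) (le_refl _) hn (by omega)]
  rw [hcnt0, hcnt1]
  rw [B_pre_loop y (x.length - 1) (by omega)]
  dsimp only
  have hp0 : ∀ i < x.length - 1,
      (((List.range (x.length - 1)).map (fun i => pvZ y (i+1))).getD i 0) = pvZ y (i+1) := by
    intro i hi
    rw [List.getD_eq_getElem?_getD, List.getElem?_map, List.getElem?_range hi]
    simp
  have hp1 : ∀ i < x.length - 1,
      (((List.range (x.length - 1)).map (fun (i : Nat) => ((i : Int) + 1 - pvZ y (i+1)))).getD i 0)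
        = (i : Int) + 1 - pvZ y (i+1) := by
    intro i hi
    rw [List.getD_eq_getElem?_getD, List.getElem?_map, List.getElem?_range hi]
    simp
  rw [B_out_loop x y (pvZ y y.length) (pvO y)
      ((List.range (x.length - 1)).map (fun i => pvZ y (i+1)))
      ((List.range (x.length - 1)).map (fun (i : Nat) => ((i : Int) + 1 - pvZ y (i+1))))
      (x.length - 1) rfl rfl hp0 hp1]
  dsimp only
  have hset : ∀ f : Nat → Int, ∀ v : Int,
      ((List.range (x.length - 1)).map f ++ List.replicate (x.length - (x.length - 1)) (0:Int)).set (x.length - 1) v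
      = (List.range (x.length - 1)).map f ++ [v] := by
    intro f v
    have hp : 0 < x.length - (x.length - 1) := by omega
    have h2 := set_pad ((List.range (x.length - 1)).map f) (x.length - (x.length - 1)) v hp
    simp only [List.length_map, List.length_range] at h2
    rw [h2]
    have h3 : x.length - (x.length - 1) - 1 = 0 := by omega
    rw [h3]
    simp
  rw [hset, hset, hset]
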